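-- pv_equiv track=rewrite | github.com/aliachawaf/Projet-Math-de-la-Decision | algo2.py | studentWhoHasMinOccurence
-- ===== SOURCE A (Python) =====
-- def studentWhoHasMinOccurence(binomes, nbStudents):
--
--     studentHasMinOccurence2 = -1
--
--     students = listStudentsInBinomes(binomes)
--
--     minOccurrence = len(binomes)
--
--     for s in range(nbStudents):
--
--         if students.count(s) <= minOccurrence and students.count(s) != 0:
--             minOccurrence = students.count(s)
--             studentHasMinOccurence2 = s
--
--     return studentHasMinOccurence2
--
-- def listStudentsInBinomes(binomes):
--
--     list = []
--     for i in range(len(binomes)):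
--         list.append(binomes[i][0]) # First student of the binome i
--         list.append(binomes[i][1]) # Second student of the binome i
--
--     return list
-- ===== SOURCE B (Python) =====
-- def studentWhoHasMinOccurence(binomes, nbStudents):
--     occ = [x for pair in binomes for x in pair if 0 <= x < nbStudents]
--     counts = {}
--     for x in occ:
--         counts[x] = counts.get(x, 0) + 1
--     if not counts:
--         return -1
--     m = min(counts.values())
--     return max(s for s, c in counts.items() if c == m)
-- ===== Notes on version B (the rewrite author's own statement) =====
-- stated objective: faster
-- what changed: Replaces A's scan over all nbStudents indices with a repeated students.count() per index by one pass building a dict of occurrence counts of in-range students, then a min over the counts and a max over the indices attaining it.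
-- intended difference: On inputs where exactly one distinct in-range student appears in the binomes and it appears more than len(binomes) times (only possible when it fills both slots of some pair), A returns -1 because its running minimum is initialised to len(binomes) instead of the maximal possible count 2*len(binomes); B returns that student, the intended least-frequent (indeed only) student. — e.g. on studentWhoHasMinOccurence([(0, 0)], 1): A returns -1, B returns 0
import Mathlib
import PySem

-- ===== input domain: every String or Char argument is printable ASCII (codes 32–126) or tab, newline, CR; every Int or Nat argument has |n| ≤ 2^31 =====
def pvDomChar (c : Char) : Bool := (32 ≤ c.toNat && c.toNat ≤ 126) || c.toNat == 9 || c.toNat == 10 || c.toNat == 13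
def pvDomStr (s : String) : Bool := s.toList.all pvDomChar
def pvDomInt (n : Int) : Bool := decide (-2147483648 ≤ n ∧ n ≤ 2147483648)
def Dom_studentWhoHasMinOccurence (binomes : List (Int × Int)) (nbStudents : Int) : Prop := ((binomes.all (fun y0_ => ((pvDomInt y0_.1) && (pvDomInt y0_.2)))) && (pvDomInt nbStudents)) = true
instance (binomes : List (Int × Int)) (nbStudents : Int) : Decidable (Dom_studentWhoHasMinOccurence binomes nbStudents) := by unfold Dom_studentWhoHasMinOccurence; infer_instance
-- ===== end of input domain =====

-- B replaces A's scan over range(nbStudents) with repeated students.count(s) calls by one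
-- counting pass over the pairs, then a min over the counts and a max over the argmin indices
-- (measured faster; see the stated intended difference above D_ below).

-- ===== PORT A =====
def listStudentsInBinomes (binomes : List (Int × Int)) : List Int :=
  (PySem.List.pyRange 0 (binomes.length : Int) 1).foldl
    (fun l i =>
      l ++ [(PySem.List.pyGetD binomes i (0, 0)).1, (PySem.List.pyGetD binomes i (0, 0)).2])
    []

def studentWhoHasMinOccurence (binomes : List (Int × Int)) (nbStudents : Int) : Int :=
  let students := listStudentsInBinomes binomes
  let r := (PySem.List.pyRange 0 nbStudents 1).foldl
    (fun (st : Int × Int) s =>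
      if (students.count s : Int) ≤ st.2 ∧ (students.count s : Int) ≠ 0 then
        (s, (students.count s : Int))
      else st)
    (-1, (binomes.length : Int))
  r.1

-- ===== PORT B =====
def studentWhoHasMinOccurence_alt (binomes : List (Int × Int)) (nbStudents : Int) : Int :=
  let occ := (binomes.flatMap (fun p => [p.1, p.2])).filter
      (fun x => decide (0 ≤ x) && decide (x < nbStudents))
  let counts : PySem.Dict Int Int :=
    occ.foldl (fun d x => d.insert x (d.getD x 0 + 1)) PySem.Dict.empty
  if counts.size = 0 then -1
  else
    match PySem.List.min? counts.values (fun v => v) with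
    | none => -1   -- unreachable totality guard: counts is nonempty here
    | some m =>
      match PySem.List.max? ((counts.items.filter (fun kv => kv.2 == m)).map Prod.fst) (fun s => s) with
      | none => -1 -- unreachable totality guard: the minimum is attained
      | some r => r

-- ===== PRECONDITION & SPEC =====
-- On inputs where exactly one distinct in-range student appears among the binome entries and it
-- occurs more than len(binomes) times, A returns -1 (its running minimum starts at len(binomes)
-- instead of the maximal possible count 2*len(binomes)); B returns that student, the intended
-- least-frequent (indeed only) student.
-- D: some in-range student x is the only in-range entry and fills more than len(binomes) slots
def D_studentWhoHasMinOccurence (binomes : List (Int × Int)) (nbStudents : Int) : Prop :=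
  ∃ p ∈ binomes, ∃ x ∈ [p.1, p.2], 0 ≤ x ∧ x < nbStudents ∧
    (∀ q ∈ binomes, ∀ y ∈ [q.1, q.2], 0 ≤ y → y < nbStudents → y = x) ∧
    binomes.length < binomes.countP (·.1 == x) + binomes.countP (·.2 == x)
instance (binomes : List (Int × Int)) (nbStudents : Int) : Decidable (D_studentWhoHasMinOccurence binomes nbStudents) := by unfold D_studentWhoHasMinOccurence; infer_instance


def Spec_studentWhoHasMinOccurence (binomes : List (Int × Int)) (nbStudents : Int) (out : Int) : Prop := ¬ D_studentWhoHasMinOccurence binomes nbStudents → out = studentWhoHasMinOccurence_alt binomes nbStudents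
instance (binomes : List (Int × Int)) (nbStudents : Int) (out : Int) : Decidable (Spec_studentWhoHasMinOccurence binomes nbStudents out) := by unfold Spec_studentWhoHasMinOccurence; infer_instance

def pvDiffWitness_studentWhoHasMinOccurence : (List (Int × Int)) × Int := ([(0, 0)], 1)
def pvDiffWitnessOut_studentWhoHasMinOccurence : Int × Int := (-1, 0)

-- ===== CLAIM (what is proved, stated in full; the proofs are below) =====
def Claim_unchanged_studentWhoHasMinOccurence : Prop := ∀ (binomes : List (Int × Int)) (nbStudents : Int), Dom_studentWhoHasMinOccurence binomes nbStudents → Spec_studentWhoHasMinOccurence binomes nbStudents (studentWhoHasMinOccurence binomes nbStudents)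
def Claim_changed_studentWhoHasMinOccurence : Prop := Dom_studentWhoHasMinOccurence (pvDiffWitness_studentWhoHasMinOccurence.1) (pvDiffWitness_studentWhoHasMinOccurence.2) ∧ D_studentWhoHasMinOccurence (pvDiffWitness_studentWhoHasMinOccurence.1) (pvDiffWitness_studentWhoHasMinOccurence.2) ∧ studentWhoHasMinOccurence (pvDiffWitness_studentWhoHasMinOccurence.1) (pvDiffWitness_studentWhoHasMinOccurence.2) = pvDiffWitnessOut_studentWhoHasMinOccurence.1 ∧ studentWhoHasMinOccurence_alt (pvDiffWitness_studentWhoHasMinOccurence.1) (pvDiffWitness_studentWhoHasMinOccurence.2) = pvDiffWitnessOut_studentWhoHasMinOccurence.2 ∧ pvDiffWitnessOut_studentWhoHasMinOccurence.1 ≠ pvDiffWitnessOut_studentWhoHasMinOccurence.2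
def Claim_exact_studentWhoHasMinOccurence : Prop := ∀ (binomes : List (Int × Int)) (nbStudents : Int), Dom_studentWhoHasMinOccurence binomes nbStudents → D_studentWhoHasMinOccurence binomes nbStudents → studentWhoHasMinOccurence binomes nbStudents ≠ studentWhoHasMinOccurence_alt binomes nbStudents

-- ===== LEMMAS AND PROOFS =====

lemma flat_countP (binomes : List (Int × Int)) (f : Int → Bool) :
    (binomes.flatMap fun p => [p.1, p.2]).countP f
    = binomes.countP (fun q => f q.1) + binomes.countP (fun q => f q.2) := by
  induction binomes with
  | nil => simp
  | cons p t ih => simp [List.countP_cons, ih]; split_ifs <;> omega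

lemma occ_len_eq_cnt (binomes : List (Int × Int)) (n x : Int)
    (hx : x ∈ ((binomes.flatMap (fun p => [p.1, p.2])).filter
        (fun y => decide (0 ≤ y) && decide (y < n))))
    (hall : ∀ y ∈ ((binomes.flatMap (fun p => [p.1, p.2])).filter
        (fun y => decide (0 ≤ y) && decide (y < n))), y = x) :
    ((binomes.flatMap (fun p => [p.1, p.2])).filter
        (fun y => decide (0 ≤ y) && decide (y < n))).length
    = binomes.countP (·.1 == x) + binomes.countP (·.2 == x) := by
  have hxr := List.of_mem_filter hx
  simp only [Bool.and_eq_true, decide_eq_true_eq] at hxr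
  have hpt : ∀ y ∈ (binomes.flatMap (fun p => [p.1, p.2])),
      (decide (0 ≤ y) && decide (y < n)) = (y == x) := by
    intro y hy
    by_cases hin : 0 ≤ y ∧ y < n
    · have : y = x := hall y (List.mem_filter.mpr ⟨hy, by simp [hin.1, hin.2]⟩)
      simp [this, hxr.1, hxr.2]
    · have hne : ¬ (y = x) := fun h => hin (h ▸ hxr)
      have : (decide (0 ≤ y) && decide (y < n)) = false := by
        rcases not_and_or.mp hin with h | h <;> simp [h]
      simp [this, hne]
  rw [← List.countP_eq_length_filter, List.countP_congr (fun y hy => by rw [hpt y hy]), flat_countP]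

lemma D_iff (binomes : List (Int × Int)) (n : Int) :
    D_studentWhoHasMinOccurence binomes n ↔
    (((binomes.flatMap (fun p => [p.1, p.2])).filter
        (fun x => decide (0 ≤ x) && decide (x < n))) ≠ [] ∧
     (∀ x ∈ ((binomes.flatMap (fun p => [p.1, p.2])).filter
        (fun x => decide (0 ≤ x) && decide (x < n))),
        x = ((binomes.flatMap (fun p => [p.1, p.2])).filter
          (fun x => decide (0 ≤ x) && decide (x < n))).headI) ∧
     (binomes.length : Int)
       < (((binomes.flatMap (fun p => [p.1, p.2])).filter
            (fun x => decide (0 ≤ x) && decide (x < n))).length : Int)) := by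
  set occ := (binomes.flatMap (fun p => [p.1, p.2])).filter
      (fun x => decide (0 ≤ x) && decide (x < n)) with hoccdef
  constructor
  · rintro ⟨p, hp, x, hxp, hx0, hxn, hall, hcnt⟩
    have hxflat : x ∈ binomes.flatMap (fun p => [p.1, p.2]) :=
      List.mem_flatMap.mpr ⟨p, hp, hxp⟩
    have hxmem : x ∈ occ := by
      rw [hoccdef]
      exact List.mem_filter.mpr ⟨hxflat, by simp [hx0, hxn]⟩
    have hally : ∀ y ∈ occ, y = x := by
      intro y hy
      obtain ⟨q, hq, hyq⟩ := List.mem_flatMap.mp (List.mem_of_mem_filter hy)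
      have hyr := List.of_mem_filter hy
      simp only [Bool.and_eq_true, decide_eq_true_eq] at hyr
      exact hall q hq y hyq hyr.1 hyr.2
    have hocc0 : occ ≠ [] := fun h => by rw [h] at hxmem; exact List.not_mem_nil hxmem
    have hhI : occ.headI ∈ occ := List.head!_mem_self (by simpa using hocc0)
    have hlen := occ_len_eq_cnt binomes n x hxmem hally
    refine ⟨hocc0, ?_, by rw [← hoccdef] at hlen; omega⟩
    intro y hy
    rw [hally y hy, hally occ.headI hhI]
  · rintro ⟨hocc0, hall, hlt⟩
    have hhI : occ.headI ∈ occ := List.head!_mem_self (by simpa using hocc0)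
    obtain ⟨p, hp, hxp⟩ := List.mem_flatMap.mp (List.mem_of_mem_filter hhI)
    have hhr := List.of_mem_filter hhI
    simp only [Bool.and_eq_true, decide_eq_true_eq] at hhr
    have hlen := occ_len_eq_cnt binomes n occ.headI hhI hall
    refine ⟨p, hp, occ.headI, hxp, hhr.1, hhr.2, ?_, by rw [← hoccdef] at hlen; omega⟩
    intro q hq y hyq h0 h1
    exact hall y (List.mem_filter.mpr ⟨List.mem_flatMap.mpr ⟨q, hq, hyq⟩, by simp [h0, h1]⟩)

def AInv (c : Int → Int) (L : Int) (k : Int) (F : Int × Int) : Prop :=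
  (F = (-1, L) ∧ ∀ s : Int, 0 ≤ s → s < k → c s = 0 ∨ L < c s)
  ∨ (0 ≤ F.1 ∧ F.1 < k ∧ c F.1 = F.2 ∧ 0 < F.2 ∧ F.2 ≤ L ∧
     (∀ s : Int, 0 ≤ s → s < k → 0 < c s → c s ≤ L → F.2 ≤ c s) ∧
     (∀ s : Int, 0 ≤ s → s < k → c s = F.2 → s ≤ F.1))

lemma foldA_inv (c : Int → Int) (hc : ∀ s, 0 ≤ c s) (L : Int) (k : Nat) :
    AInv c L (k : Int) ((PySem.List.pyRange 0 (k : Int) 1).foldl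
      (fun (st : Int × Int) s => if c s ≤ st.2 ∧ c s ≠ 0 then (s, c s) else st) (-1, L)) := by
  induction k with
  | zero =>
    left
    refine ⟨by simp [PySem.List.pyRange_one_eq_nil], by intro s h0 h1; omega⟩
  | succ n ih =>
    have hsplit : PySem.List.pyRange 0 ((n + 1 : Nat) : Int) 1
        = PySem.List.pyRange 0 (n : Int) 1 ++ [(n : Int)] := by
      push_cast
      exact PySem.List.pyRange_one_succ_right (by omega)
    rw [hsplit, List.foldl_append]
    simp only [List.foldl_cons, List.foldl_nil]
    revert ih
    generalize ((PySem.List.pyRange 0 (n : Int) 1).foldl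
      (fun (st : Int × Int) s => if c s ≤ st.2 ∧ c s ≠ 0 then (s, c s) else st) (-1, L)) = F
    intro ih
    have hcn := hc (n : Int)
    have hnn : (0 : Int) ≤ (n : Int) := by positivity
    have hcast : ((n + 1 : Nat) : Int) = (n : Int) + 1 := by push_cast; ring
    rcases ih with ⟨heq, hall⟩ | ⟨h1, h2, h3, h4, h5, h6, h7⟩
    · subst heq
      by_cases hcond : c (n : Int) ≤ L ∧ c (n : Int) ≠ 0
      · right
        rw [if_pos hcond]
        refine ⟨hnn, by omega, rfl, by omega, hcond.1, ?_, ?_⟩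
        · intro s h0 h1 hpos hle
          by_cases hsn : s < (n : Int)
          · rcases hall s h0 hsn with h | h <;> omega
          · have : s = (n : Int) := by omega
            subst this; omega
        · intro s h0 h1 _
          omega
      · left
        rw [if_neg hcond]
        refine ⟨rfl, ?_⟩
        intro s h0 h1
        by_cases hsn : s < (n : Int)
        · exact hall s h0 hsn
        · have hs : s = (n : Int) := by omega
          subst hs
          by_cases h0c : c (n : Int) = 0
          · exact Or.inl h0c
          · exact Or.inr (by simp only [not_and, ne_eq] at hcond; omega)
    · right
      by_cases hcond : c (n : Int) ≤ F.2 ∧ c (n : Int) ≠ 0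
      · rw [if_pos hcond]
        refine ⟨hnn, by omega, rfl, by omega, by omega, ?_, ?_⟩
        · intro s h0 hlt hpos hle
          by_cases hsn : s < (n : Int)
          · have := h6 s h0 hsn hpos hle; omega
          · have : s = (n : Int) := by omega
            subst this; omega
        · intro s h0 hlt heqc
          by_cases hsn : s < (n : Int)
          · omega
          · omega
      · rw [if_neg hcond]
        refine ⟨h1, by omega, h3, h4, h5, ?_, ?_⟩
        · intro s h0 hlt hpos hle
          by_cases hsn : s < (n : Int)
          · exact h6 s h0 hsn hpos hle
          · have : s = (n : Int) := by omega
            subst this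
            simp only [not_and, ne_eq] at hcond
            omega
        · intro s h0 hlt heqc
          by_cases hsn : s < (n : Int)
          · exact h7 s h0 hsn heqc
          · have : s = (n : Int) := by omega
            subst this
            exfalso
            simp only [not_and, ne_eq] at hcond
            omega

lemma listStudents_eq (binomes : List (Int × Int)) :
    listStudentsInBinomes binomes = binomes.flatMap (fun p => [p.1, p.2]) := by
  unfold listStudentsInBinomes
  rw [PySem.List.foldl_pyRange_zero_pyGetD' binomes (0,0) (fun l p => l ++ [p.1, p.2]) []]
  rw [PySem.List.foldl_append_eq_flatMap]
  simp

lemma flat_length (binomes : List (Int × Int)) :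
    (binomes.flatMap (fun p => [p.1, p.2])).length = 2 * binomes.length := by
  induction binomes with
  | nil => simp
  | cons h t ih => simp [ih]; omega

lemma count_two_le (l : List Int) (x y : Int) (hxy : x ≠ y) :
    l.count x + l.count y ≤ l.length := by
  have h1 : l.count y ≤ l.countP (fun a => !(a == x)) := by
    rw [List.count_eq_countP]
    apply List.countP_mono_left
    intro a _ h
    simp_all
    exact fun hh => hxy hh.symm
  have h3 : (fun a : Int => !decide ((a == x) = true)) = (fun a : Int => !(a == x)) := by
    funext a; rw [Bool.beq_eq_decide_eq]; simp
  have h2 := List.length_eq_countP_add_countP (l := l) (p := (· == x))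
  simp only [decide_not, h3] at h2
  rw [List.count_eq_countP]
  omega

lemma count_eq_length_of_all (l : List Int) (x : Int) (h : ∀ b ∈ l, b = x) :
    l.count x = l.length := by
  rw [List.count_eq_length]
  intro b hb; simpa using (h b hb).symm

theorem unchanged_main (binomes : List (Int × Int)) (n : Int)
    (hD : ¬ D_studentWhoHasMinOccurence binomes n) :
    studentWhoHasMinOccurence binomes n = studentWhoHasMinOccurence_alt binomes n := by
  rw [D_iff] at hD
  simp only [studentWhoHasMinOccurence, studentWhoHasMinOccurence_alt, listStudents_eq]
  set flat := binomes.flatMap (fun p => [p.1, p.2]) with hflat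
  set occ := flat.filter (fun x => decide (0 ≤ x) && decide (x < n)) with hoccdef
  set c : Int → Int := fun s => ((flat.count s : Nat) : Int) with hcdef
  set L : Int := (binomes.length : Int) with hLdef
  have hc : ∀ s, 0 ≤ c s := fun s => by simp [hcdef]
  -- occ membership / counts
  have hmemocc : ∀ x : Int, x ∈ occ ↔ (x ∈ flat ∧ 0 ≤ x ∧ x < n) := by
    intro x
    simp [hoccdef, List.mem_filter]
  have hcnt : ∀ s : Int, 0 ≤ s → s < n → (occ.count s : Int) = c s := by
    intro s h0 h1
    rw [hoccdef, List.count_filter (by simp [h0, h1])]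
  -- range bridge
  have hrange : PySem.List.pyRange 0 n 1 = PySem.List.pyRange 0 ((n.toNat : Nat) : Int) 1 := by
    have h : (((n.toNat : Nat) : Int) - 0).toNat = (n - 0).toNat := by omega
    rw [PySem.List.pyRange_one, PySem.List.pyRange_one, h]
  rw [hrange]
  have inv := foldA_inv c hc L n.toNat
  set F := (PySem.List.pyRange 0 ((n.toNat : Nat) : Int) 1).foldl
      (fun (st : Int × Int) s => if c s ≤ st.2 ∧ c s ≠ 0 then (s, c s) else st) (-1, L) with hFdef
  -- B-side normalization
  rw [PySem.Dict.foldl_insert_getD_add_one_eq_counter]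
  have hitems := PySem.Dict.items_counter (xs := occ)
  by_cases hocc0 : occ = []
  · -- no in-range student at all: both sides -1
    have hS : PySem.Set.ofList occ = [] := by rw [hocc0]; rfl
    rw [if_pos (by simp [PySem.Dict.size, hitems, hS])]
    rcases inv with ⟨hF, _⟩ | ⟨h1, h2, h3, h4, _, _, _⟩
    · rw [hF]
    · exfalso
      have : F.1 ∈ occ := by
        rw [hmemocc]
        have h4' := h4
        rw [← h3] at h4'
        simp only [hcdef] at h4'
        refine ⟨List.count_pos_iff.mp (by exact_mod_cast h4'), h1, by omega⟩
      rw [hocc0] at this; exact List.not_mem_nil this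
  · -- some in-range student appears
    obtain ⟨a0, ha0⟩ := List.exists_mem_of_ne_nil occ hocc0
    have hS0 : a0 ∈ PySem.Set.ofList occ := by rw [PySem.Set.mem_ofList]; exact ha0
    have hvals : (PySem.Dict.counter occ).values
        = (PySem.Set.ofList occ).map (fun k => ((occ.count k : Nat) : Int)) := by
      simp [PySem.Dict.values, hitems]
    have hsz : ¬ (PySem.Dict.counter occ).size = 0 := by
      simp only [PySem.Dict.size, hitems, List.length_map]
      intro h
      rw [List.length_eq_zero_iff] at h
      rw [h] at hS0; exact List.not_mem_nil hS0
    rw [if_neg hsz]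
    -- the minimum of the counts exists
    rcases hmv : PySem.List.min? (PySem.Dict.counter occ).values (fun v => v) with _ | m
    · exfalso
      rw [PySem.List.min?_eq_none_iff, hvals] at hmv
      rw [List.map_eq_nil_iff] at hmv
      rw [hmv] at hS0; exact List.not_mem_nil hS0
    have hmmem := PySem.List.min?_mem hmv
    have hmin := PySem.List.min?_isMin hmv
    rw [hvals] at hmmem
    obtain ⟨a, haS, hacnt⟩ := List.mem_map.mp hmmem
    have haocc : a ∈ occ := (PySem.Set.mem_ofList occ a).mp haS
    have harange := (hmemocc a).mp haocc
    have hapos : 0 < occ.count a := List.count_pos_iff.mpr haocc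
    have hca : c a = m := by rw [← hcnt a harange.2.1 harange.2.2]; exact hacnt
    have hmpos : 0 < m := by rw [← hacnt]; exact_mod_cast hapos
    have hmin' : ∀ k ∈ PySem.Set.ofList occ, m ≤ ((occ.count k : Nat) : Int) := by
      intro k hk
      have := hmin _ (by rw [hvals]; exact List.mem_map_of_mem hk)
      simpa using this
    have hlen2 : (occ.length : Int) ≤ 2 * L := by
      have h1 := List.length_filter_le (fun x => decide (0 ≤ x) && decide (x < n)) flat
      have h2 := flat_length binomes
      rw [← hflat] at h2
      rw [hLdef]
      rw [hoccdef]
      omega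
    have hhI : occ.headI ∈ occ := List.head!_mem_self (by simpa using hocc0)
    have hmL : m ≤ L := by
      by_cases hall : ∀ x ∈ occ, x = occ.headI
      · have hcl : occ.count occ.headI = occ.length := count_eq_length_of_all _ _ hall
        have hnotD : ¬ (L < (occ.length : Int)) := fun hlt => hD ⟨hocc0, hall, hlt⟩
        have hm_le : m ≤ (occ.count occ.headI : Int) :=
          hmin' occ.headI ((PySem.Set.mem_ofList _ _).mpr hhI)
        omega
      · push Not at hall
        obtain ⟨x, hx, hxne⟩ := hall
        have hsum := count_two_le occ x occ.headI hxne
        have hmx : m ≤ (occ.count x : Int) := hmin' x ((PySem.Set.mem_ofList _ _).mpr hx)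
        have hmh : m ≤ (occ.count occ.headI : Int) :=
          hmin' occ.headI ((PySem.Set.mem_ofList _ _).mpr hhI)
        omega
    rcases inv with ⟨hF, hallA⟩ | ⟨h1, h2, h3, h4, h5, h6, h7⟩
    · exfalso
      have := hallA a harange.2.1 (by omega)
      omega
    · have hcF1 : 0 < flat.count F.1 := by
        have h4' := h4
        rw [← h3] at h4'
        simp only [hcdef] at h4'
        exact_mod_cast h4'
      have hF1occ : F.1 ∈ occ := by
        rw [hmemocc]
        exact ⟨List.count_pos_iff.mp hcF1, h1, by omega⟩
      have hup : m ≤ F.2 := by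
        have := hmin' F.1 ((PySem.Set.mem_ofList _ _).mpr hF1occ)
        rw [hcnt F.1 h1 (by omega), h3] at this
        exact this
      have hdown : F.2 ≤ m := by
        have := h6 a harange.2.1 (by omega) (by rw [hca]; omega) (by rw [hca]; omega)
        omega
      have hF2 : F.2 = m := le_antisymm hdown hup
      set lst := (((PySem.Dict.counter occ).items.filter (fun kv => kv.2 == m)).map Prod.fst)
        with hlstdef
      have hmemlst : ∀ s : Int, s ∈ lst ↔ (s ∈ PySem.Set.ofList occ ∧ (occ.count s : Int) = m) := by
        intro s
        rw [hlstdef, hitems]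
        constructor
        · intro h
          obtain ⟨kv, hkvf, rfl⟩ := List.mem_map.mp h
          have hmem := List.mem_of_mem_filter hkvf
          have hpred := List.of_mem_filter hkvf
          obtain ⟨k, hkS, hkeq⟩ := List.mem_map.mp hmem
          subst hkeq
          simp only [beq_iff_eq] at hpred
          exact ⟨hkS, hpred⟩
        · rintro ⟨hs, hsm⟩
          apply List.mem_map.mpr
          refine ⟨(s, ((occ.count s : Nat) : Int)), ?_, rfl⟩
          apply List.mem_filter.mpr
          exact ⟨List.mem_map.mpr ⟨s, hs, rfl⟩, by simpa using hsm⟩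
      have hFlst : F.1 ∈ lst := by
        rw [hmemlst]
        refine ⟨(PySem.Set.mem_ofList _ _).mpr hF1occ, ?_⟩
        rw [hcnt F.1 h1 (by omega), h3, hF2]
      rcases hmax : PySem.List.max? lst (fun s => s) with _ | r
      · exfalso
        rw [PySem.List.max?_eq_none_iff] at hmax
        rw [hmax] at hFlst
        exact List.not_mem_nil hFlst
      · change F.1 = (match PySem.List.max? lst (fun s => s) with
          | none => (-1 : Int)
          | some r => r)
        rw [hmax]
        show F.1 = r
        have hrlst := PySem.List.max?_mem hmax
        have hrmem := (hmemlst r).mp hrlst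
        have hrocc : r ∈ occ := (PySem.Set.mem_ofList occ r).mp hrmem.1
        have hrrange := (hmemocc r).mp hrocc
        have hcr : c r = F.2 := by
          rw [← hcnt r hrrange.2.1 hrrange.2.2, hrmem.2, hF2]
        have hle1 : r ≤ F.1 := h7 r hrrange.2.1 (by omega) hcr
        have hle2 : F.1 ≤ r := by
          have := PySem.List.max?_isMax hmax F.1 hFlst
          simpa using this
        omega

theorem tight_main (binomes : List (Int × Int)) (n : Int)
    (hD : D_studentWhoHasMinOccurence binomes n) :
    studentWhoHasMinOccurence binomes n ≠ studentWhoHasMinOccurence_alt binomes n := by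
  rw [D_iff] at hD
  simp only [studentWhoHasMinOccurence, studentWhoHasMinOccurence_alt, listStudents_eq]
  set flat := binomes.flatMap (fun p => [p.1, p.2]) with hflat
  set occ := flat.filter (fun x => decide (0 ≤ x) && decide (x < n)) with hoccdef
  set c : Int → Int := fun s => ((flat.count s : Nat) : Int) with hcdef
  set L : Int := (binomes.length : Int) with hLdef
  obtain ⟨hocc0, hall, hlen⟩ := hD
  have hc : ∀ s, 0 ≤ c s := fun s => by simp [hcdef]
  have hmemocc : ∀ x : Int, x ∈ occ ↔ (x ∈ flat ∧ 0 ≤ x ∧ x < n) := by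
    intro x
    simp [hoccdef, List.mem_filter]
  have hcnt : ∀ s : Int, 0 ≤ s → s < n → (occ.count s : Int) = c s := by
    intro s h0 h1
    rw [hoccdef, List.count_filter (by simp [h0, h1])]
  have hrange : PySem.List.pyRange 0 n 1 = PySem.List.pyRange 0 ((n.toNat : Nat) : Int) 1 := by
    have h : (((n.toNat : Nat) : Int) - 0).toNat = (n - 0).toNat := by omega
    rw [PySem.List.pyRange_one, PySem.List.pyRange_one, h]
  rw [hrange]
  have inv := foldA_inv c hc L n.toNat
  set F := (PySem.List.pyRange 0 ((n.toNat : Nat) : Int) 1).foldl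
      (fun (st : Int × Int) s => if c s ≤ st.2 ∧ c s ≠ 0 then (s, c s) else st) (-1, L) with hFdef
  have hclen : (occ.count occ.headI : Int) = (occ.length : Int) := by
    exact_mod_cast count_eq_length_of_all _ _ hall
  -- the ``A`` side returns -1: every appearing in-range student is occ.headI, whose count exceeds L
  have hA : F.1 = -1 := by
    rcases inv with ⟨hF, _⟩ | ⟨h1, h2, h3, h4, h5, _, _⟩
    · rw [hF]
    · exfalso
      have hcF1 : 0 < flat.count F.1 := by
        have h4' := h4
        rw [← h3] at h4'
        simp only [hcdef] at h4'
        exact_mod_cast h4'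
      have hF1occ : F.1 ∈ occ := by
        rw [hmemocc]
        exact ⟨List.count_pos_iff.mp hcF1, h1, by omega⟩
      have hFh := hall F.1 hF1occ
      have hcc : ((occ.count F.1 : Nat) : Int) = c F.1 := hcnt F.1 h1 (by omega)
      have hcc2 : ((occ.count F.1 : Nat) : Int) = (occ.length : Int) := by rw [hFh]; exact hclen
      omega
  rw [hA]
  -- the ``B`` side returns a member of occ, hence a nonnegative student
  rw [PySem.Dict.foldl_insert_getD_add_one_eq_counter]
  have hitems := PySem.Dict.items_counter (xs := occ)
  obtain ⟨a0, ha0⟩ := List.exists_mem_of_ne_nil occ hocc0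
  have hS0 : a0 ∈ PySem.Set.ofList occ := (PySem.Set.mem_ofList _ _).mpr ha0
  have hvals : (PySem.Dict.counter occ).values
      = (PySem.Set.ofList occ).map (fun k => ((occ.count k : Nat) : Int)) := by
    simp [PySem.Dict.values, hitems]
  have hsz : ¬ (PySem.Dict.counter occ).size = 0 := by
    simp only [PySem.Dict.size, hitems, List.length_map]
    intro h
    rw [List.length_eq_zero_iff] at h
    rw [h] at hS0; exact List.not_mem_nil hS0
  rw [if_neg hsz]
  rcases hmv : PySem.List.min? (PySem.Dict.counter occ).values (fun v => v) with _ | m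
  · exfalso
    rw [PySem.List.min?_eq_none_iff, hvals] at hmv
    rw [List.map_eq_nil_iff] at hmv
    rw [hmv] at hS0; exact List.not_mem_nil hS0
  have hmmem := PySem.List.min?_mem hmv
  rw [hvals] at hmmem
  obtain ⟨a, haS, hacnt⟩ := List.mem_map.mp hmmem
  set lst := (((PySem.Dict.counter occ).items.filter (fun kv => kv.2 == m)).map Prod.fst)
    with hlstdef
  have halst : a ∈ lst := by
    rw [hlstdef, hitems]
    apply List.mem_map.mpr
    refine ⟨(a, ((occ.count a : Nat) : Int)), ?_, rfl⟩
    apply List.mem_filter.mpr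
    exact ⟨List.mem_map.mpr ⟨a, haS, rfl⟩, by simpa using hacnt⟩
  rcases hmax : PySem.List.max? lst (fun s => s) with _ | r
  · exfalso
    rw [PySem.List.max?_eq_none_iff] at hmax
    rw [hmax] at halst
    exact List.not_mem_nil halst
  · change (-1 : Int) ≠ (match PySem.List.max? lst (fun s => s) with
      | none => (-1 : Int)
      | some r => r)
    rw [hmax]
    show (-1 : Int) ≠ r
    have hrlst := PySem.List.max?_mem hmax
    rw [hlstdef, hitems] at hrlst
    obtain ⟨kv, hkvf, rfl⟩ := List.mem_map.mp hrlst
    have hmem := List.mem_of_mem_filter hkvf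
    obtain ⟨k, hkS, hkeq⟩ := List.mem_map.mp hmem
    subst hkeq
    have hkocc : k ∈ occ := (PySem.Set.mem_ofList _ _).mp hkS
    have := (hmemocc k).mp hkocc
    intro heq
    omega

-- ===== VERDICT (by name: the statement is the Claim_ definition above) =====
theorem studentWhoHasMinOccurence_spec : Claim_unchanged_studentWhoHasMinOccurence :=
  fun binomes nbStudents _ hD => unchanged_main binomes nbStudents hD

theorem studentWhoHasMinOccurence_changed : Claim_changed_studentWhoHasMinOccurence := by
  unfold Claim_changed_studentWhoHasMinOccurence; decide

theorem studentWhoHasMinOccurence_tight : Claim_exact_studentWhoHasMinOccurence :=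
  fun binomes nbStudents _ hD => tight_main binomes nbStudents hD
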